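-- pv_equiv track=rewrite | github.com/jansvobodaa/nurikabe.py | # obecne.py | inbetweenSolution
-- ===== SOURCE A (Python) =====
-- def findNeighbors(matrix,x,y):
--     directions = [[-1, 0], [1, 0], [0, -1], [0, 1]]
--     neighbors = []
--     for direction in directions:
--         dx, dy = x + direction[0], y + direction[1]
--         if 0 <= dx < len(matrix) and 0 <= dy < len(matrix[0]):
--             neighbors.append([dx, dy])
--     return neighbors
--
-- def inbetweenSolution(matrix):    #pravidlo "2. Clues separated by one square" (https://www.conceptispuzzles.com/index.aspx?uri=puzzle/nurikabe/techniques)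
--     rows, cols = len(matrix), len(matrix[0])
--     for i in range(rows):
--         for l in range(cols):
--             neighbors = findNeighbors(matrix, i, l)
--             numberedNeighbors = [matrix[n[0]][n[1]] for n in neighbors if matrix[n[0]][n[1]] > 0 and matrix[i][l] < 0]
--             if len(numberedNeighbors) >= 2:
--                 matrix[i][l] = 0
--     return matrix
-- ===== SOURCE B (Python) =====
-- def inbetweenSolution(matrix):
--     # Scatter/counts-grid rewrite: instead of gathering each cell's neighbours,
--     # every clue cell pushes +1 into a separate counts grid at each in-bounds
--     # neighbour position; a second pass zeroes the negative cells whose count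
--     # reached 2.  Mutates and returns the same matrix object.
--     rows, cols = len(matrix), len(matrix[0])
--     counts = [[0] * cols for _ in range(rows)]
--     for i in range(rows):
--         for j in range(cols):
--             if matrix[i][j] > 0:
--                 for ni, nj in ((i - 1, j), (i + 1, j), (i, j - 1), (i, j + 1)):
--                     if 0 <= ni < rows and 0 <= nj < cols:
--                         counts[ni][nj] += 1
--     for i in range(rows):
--         for j in range(cols):
--             if matrix[i][j] < 0 and counts[i][j] >= 2:
--                 matrix[i][j] = 0
--     return matrix
-- ===== Notes on version B (the rewrite author's own statement) =====
-- stated objective: faster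
-- what changed: Replaces A's per-cell gather (findNeighbors builds and filters a fresh neighbour list for every cell of the mutating matrix) by a scatter: one pass in which each clue cell increments a separate counts grid at its in-bounds neighbour positions, then a second pass that zeroes negative cells whose count is at least 2.
import Mathlib
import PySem

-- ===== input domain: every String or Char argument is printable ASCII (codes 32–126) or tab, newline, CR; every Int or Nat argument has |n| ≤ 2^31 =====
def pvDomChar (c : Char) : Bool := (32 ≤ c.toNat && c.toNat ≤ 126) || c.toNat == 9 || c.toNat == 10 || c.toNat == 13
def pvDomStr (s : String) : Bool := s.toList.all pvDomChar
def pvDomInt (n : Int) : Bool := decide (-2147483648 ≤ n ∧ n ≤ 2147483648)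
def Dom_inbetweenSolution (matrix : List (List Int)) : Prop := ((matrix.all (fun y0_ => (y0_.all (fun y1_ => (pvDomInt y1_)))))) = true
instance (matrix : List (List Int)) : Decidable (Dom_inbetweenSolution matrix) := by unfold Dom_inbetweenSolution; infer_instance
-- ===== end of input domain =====

set_option maxHeartbeats 1000000


-- B replaces A's per-cell neighbour gather by a scatter into a separate counts grid
-- (clue cells push +1 to their in-bounds neighbours, a second pass zeroes negative
-- cells with count ≥ 2); equivalence is about the returned value (both Pythons also
-- mutate the argument identically).

-- ===== PORT A =====
def findNeighbors (matrix : List (List Int)) (x y : Int) : List (Int × Int) :=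
  let directions : List (Int × Int) := [(-1, 0), (1, 0), (0, -1), (0, 1)]
  directions.foldl (fun neighbors d =>
    let dx := x + d.1
    let dy := y + d.2
    if 0 ≤ dx ∧ dx < PySem.List.len matrix ∧ 0 ≤ dy ∧ dy < PySem.List.len (PySem.List.pyGetD matrix 0 []) then
      neighbors ++ [(dx, dy)]
    else neighbors) []

def inbetweenSolution (matrix : List (List Int)) : List (List Int) :=
  let rows : Int := PySem.List.len matrix
  let cols : Int := PySem.List.len (PySem.List.pyGetD matrix 0 [])
  (PySem.List.pyRange 0 rows 1).foldl (fun m i =>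
    (PySem.List.pyRange 0 cols 1).foldl (fun m l =>
      let neighbors := findNeighbors m i l
      let numberedNeighbors := neighbors.foldl (fun acc n =>
        if PySem.List.pyGetD (PySem.List.pyGetD m n.1 []) n.2 0 > 0 ∧
           PySem.List.pyGetD (PySem.List.pyGetD m i []) l 0 < 0 then
          acc ++ [PySem.List.pyGetD (PySem.List.pyGetD m n.1 []) n.2 0]
        else acc) []
      if numberedNeighbors.length ≥ 2 then
        PySem.List.pySetD m i (PySem.List.pySetD (PySem.List.pyGetD m i []) l 0)
      else m) m) matrix

-- ===== PORT B =====
-- body of B's innermost loop: 'counts[ni][nj] += 1' guarded by the bounds test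
def bump (rows cols : Int) (cnts : List (List Int)) (n : Int × Int) : List (List Int) :=
  if 0 ≤ n.1 ∧ n.1 < rows ∧ 0 ≤ n.2 ∧ n.2 < cols then
    PySem.List.pySetD cnts n.1
      (PySem.List.pySetD (PySem.List.pyGetD cnts n.1 []) n.2
        (PySem.List.pyGetD (PySem.List.pyGetD cnts n.1 []) n.2 0 + 1))
  else cnts

def inbetweenSolution_alt (matrix : List (List Int)) : List (List Int) :=
  let rows : Int := PySem.List.len matrix
  let cols : Int := PySem.List.len (PySem.List.pyGetD matrix 0 [])
  let counts0 : List (List Int) :=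
    (PySem.List.pyRange 0 rows 1).map (fun _ => List.replicate cols.toNat 0)
  let counts :=
    (PySem.List.pyRange 0 rows 1).foldl (fun cnts i =>
      (PySem.List.pyRange 0 cols 1).foldl (fun cnts j =>
        if PySem.List.pyGetD (PySem.List.pyGetD matrix i []) j 0 > 0 then
          [((i - 1 : Int), (j : Int)), (i + 1, j), (i, j - 1), (i, j + 1)].foldl
            (bump rows cols) cnts
        else cnts) cnts) counts0
  (PySem.List.pyRange 0 rows 1).foldl (fun m i =>
    (PySem.List.pyRange 0 cols 1).foldl (fun m j =>
      if PySem.List.pyGetD (PySem.List.pyGetD m i []) j 0 < 0 ∧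
         PySem.List.pyGetD (PySem.List.pyGetD counts i []) j 0 ≥ 2 then
        PySem.List.pySetD m i (PySem.List.pySetD (PySem.List.pyGetD m i []) j 0)
      else m) m) matrix

-- ===== PRECONDITION & SPEC =====
-- Pre_ excludes exactly the inputs on which the Python A raises IndexError: the empty
-- matrix (len(matrix[0])) and matrices with a row shorter than row 0 (matrix[i][l]).
def Pre_inbetweenSolution (matrix : List (List Int)) : Prop :=
  matrix ≠ [] ∧ ∀ row ∈ matrix, (matrix.headD []).length ≤ row.length
instance (matrix : List (List Int)) : Decidable (Pre_inbetweenSolution matrix) := by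
  unfold Pre_inbetweenSolution; infer_instance

def pvWitness_inbetweenSolution : List (List Int) := [[-1, 2], [3, -4]]

def Spec_inbetweenSolution (matrix : List (List Int)) (out : List (List Int)) : Prop := out = inbetweenSolution_alt matrix
instance (matrix : List (List Int)) (out : List (List Int)) : Decidable (Spec_inbetweenSolution matrix out) := by unfold Spec_inbetweenSolution; infer_instance

-- ===== CLAIM (what is proved, stated in full; the proofs are below) =====
def Claim_equal_inbetweenSolution : Prop := ∀ (matrix : List (List Int)), Dom_inbetweenSolution matrix → Pre_inbetweenSolution matrix → Spec_inbetweenSolution matrix (inbetweenSolution matrix)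

-- ===== LEMMAS AND PROOFS =====

-- cell access, clue indicator, neighbour-clue sum — all on the ORIGINAL matrix
def gA (m : List (List Int)) (x y : Nat) : Int := (m.getD x []).getD y 0

def posInd (m : List (List Int)) (c : Nat) (x y : Nat) : Int :=
  if x < m.length ∧ y < c ∧ 0 < gA m x y then 1 else 0

def nsum (m : List (List Int)) (c : Nat) (i j : Nat) : Int :=
  (if 0 < i then posInd m c (i - 1) j else 0) + posInd m c (i + 1) j +
  (if 0 < j then posInd m c i (j - 1) else 0) + posInd m c i (j + 1)

-- the matrix after the cells before (i,j) in row-major order have been processed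
def pt (m : List (List Int)) (c : Nat) (i j : Nat) : List (List Int) :=
  m.mapIdx (fun x row => row.mapIdx (fun y v =>
    if (x < i ∨ (x = i ∧ y < j)) ∧ y < c ∧ v < 0 ∧ 2 ≤ nsum m c x y then 0 else v))

theorem pt_getElem? (m : List (List Int)) (c i j x : Nat) :
    (pt m c i j)[x]? = (m[x]?).map (fun row => row.mapIdx (fun y v =>
      if (x < i ∨ (x = i ∧ y < j)) ∧ y < c ∧ v < 0 ∧ 2 ≤ nsum m c x y then 0 else v)) := by
  simp [pt]

theorem pt_row (m : List (List Int)) (c i j x : Nat) :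
    (pt m c i j).getD x [] = (m.getD x []).mapIdx (fun y v =>
      if (x < i ∨ (x = i ∧ y < j)) ∧ y < c ∧ v < 0 ∧ 2 ≤ nsum m c x y then 0 else v) := by
  simp [List.getD_eq_getElem?_getD, pt_getElem?]
  cases m[x]? <;> simp

theorem length_pt_row (m : List (List Int)) (c i j x : Nat) :
    ((pt m c i j).getD x []).length = (m.getD x []).length := by
  rw [pt_row]; simp

theorem length_pt (m : List (List Int)) (c i j : Nat) : (pt m c i j).length = m.length := by
  simp [pt]

theorem gA_eq_getElem (m : List (List Int)) (x y : Nat) (hx : x < m.length)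
    (hy : y < (m[x]).length) : gA m x y = m[x][y] := by
  unfold gA
  rw [List.getD_eq_getElem m [] hx, List.getD_eq_getElem (m[x]) 0 hy]

theorem gA_eq_zero_row (m : List (List Int)) (x y : Nat) (hx : x < m.length)
    (hy : (m[x]).length ≤ y) : gA m x y = 0 := by
  unfold gA
  rw [List.getD_eq_getElem m [] hx, List.getD_eq_default (m[x]) 0 hy]

theorem gA_eq_zero_col (m : List (List Int)) (x y : Nat) (hx : m.length ≤ x) :
    gA m x y = 0 := by
  unfold gA
  rw [List.getD_eq_default m [] hx]
  simp

theorem pt_length_row (m : List (List Int)) (c i j x : Nat) (hx : x < m.length) :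
    ((pt m c i j)[x]'(by simp [pt]; omega)).length = (m[x]).length := by
  simp [pt]

theorem pt_entry (m : List (List Int)) (c i j x y : Nat) (hx : x < m.length)
    (hy : y < (m[x]).length) :
    ((pt m c i j)[x]'(by simp [pt]; omega))[y]'(by simp [pt]; omega) =
      if (x < i ∨ (x = i ∧ y < j)) ∧ y < c ∧ gA m x y < 0 ∧ 2 ≤ nsum m c x y then 0
      else gA m x y := by
  simp only [pt, List.getElem_mapIdx]
  rw [gA_eq_getElem m x y hx hy]

theorem gA_pt (m : List (List Int)) (c i j x y : Nat) :
    gA (pt m c i j) x y =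
      if (x < i ∨ (x = i ∧ y < j)) ∧ y < c ∧ gA m x y < 0 ∧ 2 ≤ nsum m c x y then 0
      else gA m x y := by
  by_cases hx : x < m.length
  · by_cases hy : y < (m[x]).length
    · have h1 : gA (pt m c i j) x y = ((pt m c i j)[x]'(by simp [pt]; omega))[y]'(by simp [pt]; omega) := by
        apply gA_eq_getElem
      rw [h1, pt_entry m c i j x y hx hy]
    · have h0 : gA m x y = 0 := gA_eq_zero_row m x y hx (by omega)
      have h0' : gA (pt m c i j) x y = 0 := by
        apply gA_eq_zero_row (pt m c i j) x y (by rw [length_pt]; omega)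
        rw [pt_length_row m c i j x hx]; omega
      rw [h0, h0']; split_ifs with h
      · rfl
      · rfl
  · have h0 : gA m x y = 0 := gA_eq_zero_col m x y (by omega)
    have h0' : gA (pt m c i j) x y = 0 := gA_eq_zero_col _ x y (by rw [length_pt]; omega)
    rw [h0, h0']; split_ifs with h
    · rfl
    · rfl

theorem gA_pt_pos (m : List (List Int)) (c i j x y : Nat) :
    (0 < gA (pt m c i j) x y) ↔ (0 < gA m x y) := by
  rw [gA_pt]; split_ifs with h
  · constructor
    · omega
    · intro hp; exact absurd h.2.2.1 (by omega)
  · exact Iff.rfl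

theorem gA_pt_self (m : List (List Int)) (c i j : Nat) : gA (pt m c i j) i j = gA m i j := by
  rw [gA_pt]; split_ifs with h
  · exfalso; rcases h.1 with h1 | h1 <;> omega
  · rfl

theorem pt_zero (m : List (List Int)) (c : Nat) : pt m c 0 0 = m := by
  apply List.ext_getElem (by rw [length_pt])
  intro x hx hx'
  apply List.ext_getElem (by rw [pt_length_row m c 0 0 x hx'])
  intro y hy hy'
  rw [pt_entry m c 0 0 x y hx' (by rw [pt_length_row m c 0 0 x hx'] at hy; omega)]
  rw [if_neg (by omega), gA_eq_getElem m x y hx' (by rw [pt_length_row m c 0 0 x hx'] at hy; omega)]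

theorem pt_row_eq (m : List (List Int)) (c i j x : Nat) (hx : x < m.length) :
    (pt m c i j)[x]'(by rw [length_pt]; omega) = (m[x]).mapIdx (fun y v =>
      if (x < i ∨ (x = i ∧ y < j)) ∧ y < c ∧ v < 0 ∧ 2 ≤ nsum m c x y then 0 else v) := by
  have h := pt_getElem? m c i j x
  rw [List.getElem?_eq_getElem hx, List.getElem?_eq_getElem (by rw [length_pt]; omega : x < (pt m c i j).length)] at h
  simpa using h

theorem pt_row_end (m : List (List Int)) (c i : Nat) : pt m c i c = pt m c (i + 1) 0 := by
  apply List.ext_getElem?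
  intro x
  rw [pt_getElem?, pt_getElem?]
  cases hm : m[x]? with
  | none => rfl
  | some row =>
    simp only [Option.map_some]
    congr 1
    apply List.mapIdx_eq_mapIdx_iff.mpr
    intro y hy
    apply if_congr _ rfl rfl
    constructor
    · rintro ⟨h1, h2, h3⟩
      exact ⟨Or.inl (by rcases h1 with h | h <;> omega), h2, h3⟩
    · rintro ⟨h1, h2, h3⟩
      refine ⟨?_, h2, h3⟩
      rcases h1 with h | h
      · rcases (by omega : x < i ∨ x = i) with h' | h'
        · exact Or.inl h'
        · exact Or.inr ⟨h', h2⟩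
      · omega

theorem pt_set (m : List (List Int)) (c i j : Nat) (hi : i < m.length) (hj : j < c)
    (hc : gA m i j < 0 ∧ 2 ≤ nsum m c i j) :
    (pt m c i j).set i (((pt m c i j).getD i []).set j 0) = pt m c i (j + 1) := by
  have hrow : (pt m c i j).getD i [] = (pt m c i j)[i]'(by rw [length_pt]; omega) :=
    List.getD_eq_getElem (pt m c i j) [] (by rw [length_pt]; omega)
  rw [hrow, pt_row_eq m c i j i hi]
  apply List.ext_getElem?
  intro x
  rw [List.getElem?_set, pt_getElem?]
  by_cases hxi : i = x
  · subst hxi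
    rw [if_pos rfl, if_pos (by rw [length_pt]; omega)]
    rw [pt_getElem? m c i (j + 1) i, List.getElem?_eq_getElem hi, Option.map_some]
    congr 1
    apply List.ext_getElem?
    intro y
    rw [List.getElem?_set, List.getElem?_mapIdx, List.getElem?_mapIdx]
    by_cases hyj : j = y
    · subst hyj
      rw [if_pos rfl]
      cases hm : (m[i])[j]? with
      | none =>
        rw [if_neg (by simp at hm ⊢; omega), Option.map_none]
      | some v =>
        have hjlen : j < (m[i]).length := by
          rcases List.getElem?_eq_some_iff.mp hm with ⟨h', _⟩; exact h'
        rw [if_pos (by simpa using hjlen), Option.map_some]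
        congr 1
        have hv : v = gA m i j := by
          rw [gA_eq_getElem m i j hi hjlen]
          rcases List.getElem?_eq_some_iff.mp hm with ⟨_, h2⟩; omega
        rw [if_pos ⟨Or.inr ⟨rfl, by omega⟩, hj, by omega, hc.2⟩]
    · rw [if_neg hyj]
      cases hm : (m[i])[y]? with
      | none => rfl
      | some v =>
        simp only [Option.map_some]
        congr 1
        apply if_congr _ rfl rfl
        constructor
        · rintro ⟨h1, h2, h3⟩
          rcases h1 with h | h
          · exact ⟨Or.inl h, h2, h3⟩
          · exact ⟨Or.inr ⟨h.1, by omega⟩, h2, h3⟩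
        · rintro ⟨h1, h2, h3⟩
          rcases h1 with h | h
          · exact ⟨Or.inl h, h2, h3⟩
          · exact ⟨Or.inr ⟨h.1, by omega⟩, h2, h3⟩
  · rw [if_neg hxi, pt_getElem?]
    cases hm : m[x]? with
    | none => rfl
    | some row =>
      simp only [Option.map_some]
      congr 1
      apply List.mapIdx_eq_mapIdx_iff.mpr
      intro y hy
      apply if_congr _ rfl rfl
      constructor
      · rintro ⟨h1, h2, h3⟩
        rcases h1 with h | h
        · exact ⟨Or.inl h, h2, h3⟩
        · exact absurd h.1.symm hxi
      · rintro ⟨h1, h2, h3⟩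
        rcases h1 with h | h
        · exact ⟨Or.inl h, h2, h3⟩
        · exact absurd h.1.symm hxi

theorem pt_noset (m : List (List Int)) (c i j : Nat)
    (hc : ¬ (gA m i j < 0 ∧ 2 ≤ nsum m c i j)) :
    pt m c i j = pt m c i (j + 1) := by
  apply List.ext_getElem?
  intro x
  rw [pt_getElem?, pt_getElem?]
  cases hm : m[x]? with
  | none => rfl
  | some row =>
    have hx : x < m.length := by
      rcases List.getElem?_eq_some_iff.mp hm with ⟨h', _⟩; exact h'
    simp only [Option.map_some]
    congr 1
    apply List.mapIdx_eq_mapIdx_iff.mpr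
    intro y hy
    apply if_congr _ rfl rfl
    constructor
    · rintro ⟨h1, h2, h3⟩
      rcases h1 with h | h
      · exact ⟨Or.inl h, h2, h3⟩
      · exact ⟨Or.inr ⟨h.1, by omega⟩, h2, h3⟩
    · rintro ⟨h1, h2, h3, h4⟩
      rcases h1 with h | h
      · exact ⟨Or.inl h, h2, h3, h4⟩
      · by_cases hyj : y < j
        · exact ⟨Or.inr ⟨h.1, hyj⟩, h2, h3, h4⟩
        · exfalso
          have hyy : y = j := by omega
          have hxx : x = i := h.1
          subst hyy; subst hxx
          have hrv : row[y] = gA m x y := by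
            rw [gA_eq_getElem m x y hx (by rcases List.getElem?_eq_some_iff.mp hm with ⟨_, h2'⟩; subst h2'; omega)]
            rcases List.getElem?_eq_some_iff.mp hm with ⟨_, h2'⟩
            subst h2'; rfl
          rw [hrv] at h3
          exact hc ⟨h3, h4⟩


theorem findNeighbors_eval (m : List (List Int)) (i j : Nat) (hi : i < m.length)
    (hj : j < (m.getD 0 []).length) :
    findNeighbors m (↑i) (↑j) =
      (if 0 < i then [((i : Int) - 1, (j : Int))] else []) ++
      ((if i + 1 < m.length then [((i : Int) + 1, (j : Int))] else []) ++
       ((if 0 < j then [((i : Int), (j : Int) - 1)] else []) ++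
        (if j + 1 < (m.getD 0 []).length then [((i : Int), (j : Int) + 1)] else []))) := by
  simp only [findNeighbors, List.foldl_cons, List.foldl_nil, PySem.List.len_eq,
    PySem.List.pyGetD_zero]
  have e1 : (0 ≤ (i:Int) + -1 ∧ (i:Int) + -1 < (m.length:Int) ∧ 0 ≤ (j:Int) + 0 ∧ (j:Int) + 0 < ((m.getD 0 []).length:Int)) ↔ 0 < i := by omega
  have e2 : (0 ≤ (i:Int) + 1 ∧ (i:Int) + 1 < (m.length:Int) ∧ 0 ≤ (j:Int) + 0 ∧ (j:Int) + 0 < ((m.getD 0 []).length:Int)) ↔ i + 1 < m.length := by omega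
  have e3 : (0 ≤ (i:Int) + 0 ∧ (i:Int) + 0 < (m.length:Int) ∧ 0 ≤ (j:Int) + -1 ∧ (j:Int) + -1 < ((m.getD 0 []).length:Int)) ↔ 0 < j := by omega
  have e4 : (0 ≤ (i:Int) + 0 ∧ (i:Int) + 0 < (m.length:Int) ∧ 0 ≤ (j:Int) + 1 ∧ (j:Int) + 1 < ((m.getD 0 []).length:Int)) ↔ j + 1 < (m.getD 0 []).length := by omega
  simp only [e1, e2, e3, e4]
  split_ifs <;> simp [Int.sub_eq_add_neg]


def stepA (m : List (List Int)) (i l : Int) : List (List Int) :=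
  let neighbors := findNeighbors m i l
  let numberedNeighbors := neighbors.foldl (fun acc n =>
    if PySem.List.pyGetD (PySem.List.pyGetD m n.1 []) n.2 0 > 0 ∧
       PySem.List.pyGetD (PySem.List.pyGetD m i []) l 0 < 0 then
      acc ++ [PySem.List.pyGetD (PySem.List.pyGetD m n.1 []) n.2 0]
    else acc) []
  if numberedNeighbors.length ≥ 2 then
    PySem.List.pySetD m i (PySem.List.pySetD (PySem.List.pyGetD m i []) l 0)
  else m

theorem portA_unfold (matrix : List (List Int)) :
    inbetweenSolution matrix =
      (PySem.List.pyRange 0 (PySem.List.len matrix) 1).foldl (fun m i =>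
        (PySem.List.pyRange 0 (PySem.List.len (PySem.List.pyGetD matrix 0 [])) 1).foldl
          (fun m l => stepA m i l) m) matrix := rfl

theorem gA_getD (m : List (List Int)) (x y : Nat) :
    PySem.List.pyGetD (PySem.List.pyGetD m (x : Int) []) (y : Int) 0 = gA m x y := by
  simp [PySem.List.pyGetD_natCast, gA]

theorem stepA_pt (m : List (List Int)) (c i j : Nat) (hcc : (m.getD 0 []).length = c)
    (hi : i < m.length) (hj : j < c) :
    stepA (pt m c i j) (↑i) (↑j) = pt m c i (j + 1) := by
  have hlen : (pt m c i j).length = m.length := length_pt m c i j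
  have hrow0 : ((pt m c i j).getD 0 []).length = c := by
    rw [length_pt_row]; exact hcc
  simp only [stepA]
  rw [findNeighbors_eval (pt m c i j) i j (by omega) (by omega)]
  rw [PySem.List.foldl_append_ite
    (fun n : Int × Int => PySem.List.pyGetD (PySem.List.pyGetD (pt m c i j) n.1 []) n.2 0 > 0 ∧
      PySem.List.pyGetD (PySem.List.pyGetD (pt m c i j) (↑i) []) (↑j) 0 < 0)
    (fun n : Int × Int => PySem.List.pyGetD (PySem.List.pyGetD (pt m c i j) n.1 []) n.2 0)]
  rw [List.nil_append]
  have hself : PySem.List.pyGetD (PySem.List.pyGetD (pt m c i j) (↑i : Int) []) (↑j : Int) 0 = gA m i j := by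
    rw [gA_getD]; exact gA_pt_self m c i j
  have hup : 0 < i → (PySem.List.pyGetD (PySem.List.pyGetD (pt m c i j) ((i : Int) - 1) []) (↑j : Int) 0 = gA (pt m c i j) (i - 1) j) := by
    intro h
    have : ((i : Int) - 1) = ((i - 1 : Nat) : Int) := by omega
    rw [this, gA_getD]
  have hdown : PySem.List.pyGetD (PySem.List.pyGetD (pt m c i j) ((i : Int) + 1) []) (↑j : Int) 0 = gA (pt m c i j) (i + 1) j := by
    have : ((i : Int) + 1) = ((i + 1 : Nat) : Int) := by omega
    rw [this, gA_getD]
  have hleft : 0 < j → (PySem.List.pyGetD (PySem.List.pyGetD (pt m c i j) (↑i : Int) []) ((j : Int) - 1) 0 = gA (pt m c i j) i (j - 1)) := by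
    intro h
    have : ((j : Int) - 1) = ((j - 1 : Nat) : Int) := by omega
    rw [this, gA_getD]
  have hright : PySem.List.pyGetD (PySem.List.pyGetD (pt m c i j) (↑i : Int) []) ((j : Int) + 1) 0 = gA (pt m c i j) i (j + 1) := by
    have : ((j : Int) + 1) = ((j + 1 : Nat) : Int) := by omega
    rw [this, gA_getD]
  have key : ((List.map (fun n : Int × Int => PySem.List.pyGetD (PySem.List.pyGetD (pt m c i j) n.1 []) n.2 0)
      (List.filter (fun x : Int × Int => decide (PySem.List.pyGetD (PySem.List.pyGetD (pt m c i j) x.1 []) x.2 0 > 0 ∧ PySem.List.pyGetD (PySem.List.pyGetD (pt m c i j) (↑i : Int) []) ((↑j : Int)) 0 < 0))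
        ((if 0 < i then [((i : Int) - 1, (j : Int))] else []) ++
          ((if i + 1 < (pt m c i j).length then [((i : Int) + 1, (j : Int))] else []) ++
            ((if 0 < j then [((i : Int), (j : Int) - 1)] else []) ++
              (if j + 1 < ((pt m c i j).getD 0 []).length then [((i : Int), (j : Int) + 1)] else [])))))).length ≥ 2)
      ↔ (gA m i j < 0 ∧ 2 ≤ nsum m c i j) := by
    rw [List.length_map, ← List.countP_eq_length_filter]
    simp only [List.countP_append]
    by_cases hs : gA m i j < 0
    · have t1 : (List.countP (fun x : Int × Int => decide (PySem.List.pyGetD (PySem.List.pyGetD (pt m c i j) x.1 []) x.2 0 > 0 ∧ PySem.List.pyGetD (PySem.List.pyGetD (pt m c i j) (↑i : Int) []) ((↑j : Int)) 0 < 0)) (if 0 < i then [((i:Int)-1, (j:Int))] else []) : Int)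
          = (if 0 < i then posInd m c (i-1) j else 0) := by
        by_cases h1 : 0 < i
        · simp only [if_pos h1, List.countP_cons, List.countP_nil]
          simp only [hup h1, hself, gA_pt_pos, posInd]
          split_ifs <;> simp_all <;> omega
        · simp [h1]
      have t2 : (List.countP (fun x : Int × Int => decide (PySem.List.pyGetD (PySem.List.pyGetD (pt m c i j) x.1 []) x.2 0 > 0 ∧ PySem.List.pyGetD (PySem.List.pyGetD (pt m c i j) (↑i : Int) []) ((↑j : Int)) 0 < 0)) (if i + 1 < (pt m c i j).length then [((i:Int)+1, (j:Int))] else []) : Int)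
          = posInd m c (i+1) j := by
        by_cases h1 : i + 1 < m.length
        · simp only [hlen, if_pos h1, List.countP_cons, List.countP_nil]
          simp only [hdown, hself, gA_pt_pos, posInd]
          split_ifs <;> simp_all <;> omega
        · simp only [hlen, if_neg h1, List.countP_nil, posInd]
          rw [if_neg (by omega)]
          rfl
      have t3 : (List.countP (fun x : Int × Int => decide (PySem.List.pyGetD (PySem.List.pyGetD (pt m c i j) x.1 []) x.2 0 > 0 ∧ PySem.List.pyGetD (PySem.List.pyGetD (pt m c i j) (↑i : Int) []) ((↑j : Int)) 0 < 0)) (if 0 < j then [((i:Int), (j:Int)-1)] else []) : Int)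
          = (if 0 < j then posInd m c i (j-1) else 0) := by
        by_cases h1 : 0 < j
        · simp only [if_pos h1, List.countP_cons, List.countP_nil]
          simp only [hleft h1, hself, gA_pt_pos, posInd]
          split_ifs <;> simp_all <;> omega
        · simp [h1]
      have t4 : (List.countP (fun x : Int × Int => decide (PySem.List.pyGetD (PySem.List.pyGetD (pt m c i j) x.1 []) x.2 0 > 0 ∧ PySem.List.pyGetD (PySem.List.pyGetD (pt m c i j) (↑i : Int) []) ((↑j : Int)) 0 < 0)) (if j + 1 < ((pt m c i j).getD 0 []).length then [((i:Int), (j:Int)+1)] else []) : Int)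
          = posInd m c i (j+1) := by
        by_cases h1 : j + 1 < c
        · simp only [hrow0, if_pos h1, List.countP_cons, List.countP_nil]
          simp only [hright, hself, gA_pt_pos, posInd]
          split_ifs <;> simp_all <;> omega
        · simp only [hrow0, if_neg h1, List.countP_nil, posInd]
          rw [if_neg (by omega)]
          rfl
      constructor
      · intro h2
        refine ⟨hs, ?_⟩
        unfold nsum
        omega
      · intro h2
        have := h2.2
        unfold nsum at this
        omega
    · have hz : ∀ (l : List (Int × Int)), List.countP (fun x : Int × Int => decide (PySem.List.pyGetD (PySem.List.pyGetD (pt m c i j) x.1 []) x.2 0 > 0 ∧ PySem.List.pyGetD (PySem.List.pyGetD (pt m c i j) (↑i : Int) []) ((↑j : Int)) 0 < 0)) l = 0 := by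
        intro l
        apply List.countP_eq_zero.mpr
        intro a _
        simp only [hself, decide_eq_true_eq]
        rintro ⟨_, h2⟩
        exact hs h2
      simp only [hz]
      constructor
      · intro h; omega
      · rintro ⟨h, _⟩; exact absurd h hs
  by_cases hcond : gA m i j < 0 ∧ 2 ≤ nsum m c i j
  · rw [if_pos (key.mpr hcond)]
    have h1 : PySem.List.pyGetD (pt m c i j) (↑i : Int) [] = (pt m c i j).getD i [] := by
      simp [PySem.List.pyGetD_natCast]
    rw [h1, PySem.List.pySetD_natCast, PySem.List.pySetD_natCast]
    exact pt_set m c i j hi hj hcond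
  · rw [if_neg (fun hh => hcond (key.mp hh))]
    exact pt_noset m c i j hcond

theorem loopA_inner (m : List (List Int)) (c i : Nat) (hcc : (m.getD 0 []).length = c)
    (hi : i < m.length) :
    ∀ (k j : Nat), j + k = c →
      (PySem.List.pyRange (↑j) (↑c) 1).foldl (fun mm l => stepA mm (↑i) l) (pt m c i j)
        = pt m c i c := by
  intro k
  induction k with
  | zero =>
    intro j hj
    have hjc : j = c := by omega
    subst hjc
    rw [PySem.List.pyRange_one_eq_nil (by omega)]
    rfl
  | succ k ih =>
    intro j hj
    rw [PySem.List.pyRange_one_cons (by exact_mod_cast (by omega : j < c))]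
    simp only [List.foldl_cons]
    rw [stepA_pt m c i j hcc hi (by omega)]
    have hcast : ((j : Int) + 1) = ((j + 1 : Nat) : Int) := by push_cast; ring
    rw [hcast]
    exact ih (j + 1) (by omega)

theorem loopA_outer (m : List (List Int)) (c : Nat) (hcc : (m.getD 0 []).length = c) :
    ∀ (k i : Nat), i + k = m.length →
      (PySem.List.pyRange (↑i) (↑m.length) 1).foldl (fun mm ii =>
        (PySem.List.pyRange 0 (↑c) 1).foldl (fun mm2 l => stepA mm2 ii l) mm) (pt m c i 0)
        = pt m c m.length 0 := by
  intro k
  induction k with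
  | zero =>
    intro i hi
    have hieq : i = m.length := by omega
    subst hieq
    rw [show PySem.List.pyRange (↑m.length) (↑m.length) 1 = [] from
      PySem.List.pyRange_one_eq_nil (by omega)]
    rfl
  | succ k ih =>
    intro i hi
    rw [show PySem.List.pyRange (↑i) (↑m.length) 1 = (↑i : Int) :: PySem.List.pyRange ((↑i : Int) + 1) (↑m.length) 1 from
      PySem.List.pyRange_one_cons (by exact_mod_cast (by omega : i < m.length))]
    simp only [List.foldl_cons]
    have h0 : (PySem.List.pyRange 0 (↑c) 1).foldl (fun mm2 l => stepA mm2 (↑i) l) (pt m c i 0)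
        = pt m c i c := by
      have := loopA_inner m c i hcc (by omega) c 0 (by omega)
      simpa using this
    rw [h0, pt_row_end]
    have hcast : ((i : Int) + 1) = ((i + 1 : Nat) : Int) := by push_cast; ring
    rw [hcast]
    exact ih (i + 1) (by omega)

theorem portA_eq (matrix : List (List Int)) :
    inbetweenSolution matrix = pt matrix ((matrix.getD 0 []).length) matrix.length 0 := by
  rw [portA_unfold]
  have h1 : PySem.List.len (PySem.List.pyGetD matrix 0 []) = (((matrix.getD 0 []).length : Nat) : Int) := by
    simp [PySem.List.len_eq, PySem.List.pyGetD_zero]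
  rw [h1, PySem.List.len_eq]
  have := loopA_outer matrix ((matrix.getD 0 []).length) rfl matrix.length 0 (by omega)
  rw [pt_zero] at this
  simpa using this

-- ===== B-side proof helpers =====

-- prefix neighbour-clue count: contributions to cell (x,y) from clue cells (a,b)
-- that precede (i,j) in row-major order
def scnt (m : List (List Int)) (c i j x y : Nat) : Int :=
  (if 0 < x ∧ (x - 1 < i ∨ (x - 1 = i ∧ y < j)) then posInd m c (x - 1) y else 0) +
  (if x + 1 < i ∨ (x + 1 = i ∧ y < j) then posInd m c (x + 1) y else 0) +
  (if 0 < y ∧ (x < i ∨ (x = i ∧ y - 1 < j)) then posInd m c x (y - 1) else 0) +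
  (if x < i ∨ (x = i ∧ y + 1 < j) then posInd m c x (y + 1) else 0)

-- the counts grid after the clue cells before (i,j) have scattered
def cg (m : List (List Int)) (c i j : Nat) : List (List Int) :=
  (List.range m.length).map (fun x => (List.range c).map (fun y => scnt m c i j x y))

theorem length_cg (m : List (List Int)) (c i j : Nat) : (cg m c i j).length = m.length := by
  simp [cg]

theorem rows_cg (m : List (List Int)) (c i j : Nat) :
    ∀ row ∈ cg m c i j, row.length = c := by
  intro row hrow
  simp [cg] at hrow
  obtain ⟨x, _, hx⟩ := hrow
  simp [← hx]

theorem gA_cg (m : List (List Int)) (c i j x y : Nat) (hx : x < m.length) (hy : y < c) :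
    gA (cg m c i j) x y = scnt m c i j x y := by
  unfold gA cg
  have hx' : x < ((List.range m.length).map (fun x => (List.range c).map (fun y => scnt m c i j x y))).length := by
    simpa using hx
  rw [List.getD_eq_getElem _ _ hx', List.getElem_map]
  have hy' : y < ((List.range c).map (fun y => scnt m c i j ((List.range m.length)[x]'(by simpa using hx)) y)).length := by
    simpa using hy
  rw [List.getD_eq_getElem _ _ hy', List.getElem_map]
  simp

theorem length_bump (R C : Int) (g : List (List Int)) (p : Int × Int) :
    (bump R C g p).length = g.length := by
  unfold bump
  split_ifs
  · rw [PySem.List.length_pySetD]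
  · rfl

theorem rows_bump (R C : Int) (g : List (List Int)) (c : Nat)
    (hR : R = (g.length : Int)) (hrow : ∀ row ∈ g, row.length = c) (p : Int × Int) :
    ∀ row ∈ bump R C g p, row.length = c := by
  unfold bump
  split_ifs with hb
  · intro row hmem
    rw [PySem.List.pySetD_of_nonneg _ _ hb.1] at hmem
    rcases List.mem_or_eq_of_mem_set hmem with h | h
    · exact hrow row h
    · subst h
      rw [PySem.List.length_pySetD]
      rw [PySem.List.pyGetD_of_nonneg _ _ hb.1]
      have hu : p.1.toNat < g.length := by
        obtain ⟨h1, h2, _, _⟩ := hb; omega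
      rw [List.getD_eq_getElem _ _ hu]
      exact hrow _ (List.getElem_mem hu)
  · exact fun row h => hrow row h

theorem getD_set_eq (l : List (List Int)) (n : Nat) (r : List Int) (hn : n < l.length) :
    (l.set n r).getD n [] = r := by
  rw [List.getD_eq_getElem _ _ (by simpa using hn)]
  simp [List.getElem_set]

theorem getD_set_ne (l : List (List Int)) (n x : Nat) (r : List Int) (hne : n ≠ x) :
    (l.set n r).getD x [] = l.getD x [] := by
  rw [List.getD_eq_getElem?_getD, List.getD_eq_getElem?_getD, List.getElem?_set, if_neg hne]

theorem getDI_set_eq (l : List Int) (n : Nat) (v : Int) (hn : n < l.length) :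
    (l.set n v).getD n 0 = v := by
  rw [List.getD_eq_getElem _ _ (by simpa using hn)]
  simp [List.getElem_set]

theorem getDI_set_ne (l : List Int) (n x : Nat) (v : Int) (hne : n ≠ x) :
    (l.set n v).getD x 0 = l.getD x 0 := by
  rw [List.getD_eq_getElem?_getD, List.getD_eq_getElem?_getD, List.getElem?_set, if_neg hne]

theorem gA_bump (R C : Int) (g : List (List Int)) (c : Nat)
    (hR : R = (g.length : Int)) (hC : C = (c : Int))
    (hrow : ∀ row ∈ g, row.length = c) (p : Int × Int) (x y : Nat) :
    gA (bump R C g p) x y =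
      gA g x y + (if p.1 = (x : Int) ∧ p.2 = (y : Int) ∧ x < g.length ∧ y < c then 1 else 0) := by
  unfold bump
  by_cases hb : 0 ≤ p.1 ∧ p.1 < R ∧ 0 ≤ p.2 ∧ p.2 < C
  · rw [if_pos hb]
    obtain ⟨h1, h2, h3, h4⟩ := hb
    subst hR hC
    have hp1 : p.1 = (p.1.toNat : Int) := by omega
    have hp2 : p.2 = (p.2.toNat : Int) := by omega
    have hu : p.1.toNat < g.length := by omega
    have hrowlen : (g.getD p.1.toNat []).length = c := by
      rw [List.getD_eq_getElem _ _ hu]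
      exact hrow _ (List.getElem_mem hu)
    have hv : p.2.toNat < (g.getD p.1.toNat []).length := by omega
    rw [PySem.List.pySetD_of_nonneg _ _ h1, PySem.List.pyGetD_of_nonneg _ _ h1,
      PySem.List.pySetD_of_nonneg _ _ h3, PySem.List.pyGetD_of_nonneg _ _ h3]
    unfold gA
    by_cases hxu : p.1.toNat = x
    · rw [← hxu, getD_set_eq g p.1.toNat _ hu]
      by_cases hyv : p.2.toNat = y
      · rw [← hyv, getDI_set_eq _ p.2.toNat _ hv]
        rw [if_pos ⟨by omega, by omega, by omega, by omega⟩]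
      · rw [getDI_set_ne _ p.2.toNat y _ hyv]
        rw [if_neg (by rintro ⟨hh1, hh2, _, _⟩; exact hyv (by omega)), add_zero]
    · rw [getD_set_ne g p.1.toNat x _ hxu]
      rw [if_neg (by rintro ⟨hh1, _, _, _⟩; exact hxu (by omega)), add_zero]
  · rw [if_neg hb]
    rw [if_neg (by rintro ⟨hh1, hh2, hh3, hh4⟩; exact hb ⟨by omega, by omega, by omega, by omega⟩), add_zero]

theorem grid_ext (g h : List (List Int)) (c : Nat) (hlen : g.length = h.length)
    (hg : ∀ row ∈ g, row.length = c) (hh : ∀ row ∈ h, row.length = c)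
    (he : ∀ x y : Nat, x < g.length → y < c → gA g x y = gA h x y) : g = h := by
  apply List.ext_getElem hlen
  intro x h1 h2
  have lg : (g[x]).length = c := hg _ (List.getElem_mem h1)
  have lh : (h[x]).length = c := hh _ (List.getElem_mem h2)
  apply List.ext_getElem (by rw [lg, lh])
  intro y hy hy'
  rw [← gA_eq_getElem g x y h1 hy, ← gA_eq_getElem h x y h2 hy']
  exact he x y h1 (by omega)

theorem scnt_succ (m : List (List Int)) (c i j x y : Nat) :
    scnt m c i (j + 1) x y = scnt m c i j x y
      + (if x + 1 = i ∧ y = j then posInd m c i j else 0)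
      + (if x = i + 1 ∧ y = j then posInd m c i j else 0)
      + (if x = i ∧ y + 1 = j then posInd m c i j else 0)
      + (if x = i ∧ y = j + 1 then posInd m c i j else 0) := by
  unfold scnt
  have t1 : (if 0 < x ∧ (x - 1 < i ∨ (x - 1 = i ∧ y < j + 1)) then posInd m c (x - 1) y else 0)
      = (if 0 < x ∧ (x - 1 < i ∨ (x - 1 = i ∧ y < j)) then posInd m c (x - 1) y else 0)
      + (if x = i + 1 ∧ y = j then posInd m c i j else 0) := by
    by_cases hf : x = i + 1 ∧ y = j
    · obtain ⟨hfx, hfy⟩ := hf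
      subst hfx hfy
      rw [if_pos (by omega), if_neg (by omega), if_pos ⟨rfl, rfl⟩]
      simp
    · rw [if_neg hf, add_zero]
      exact if_congr (by omega) rfl rfl
  have t2 : (if x + 1 < i ∨ (x + 1 = i ∧ y < j + 1) then posInd m c (x + 1) y else 0)
      = (if x + 1 < i ∨ (x + 1 = i ∧ y < j) then posInd m c (x + 1) y else 0)
      + (if x + 1 = i ∧ y = j then posInd m c i j else 0) := by
    by_cases hf : x + 1 = i ∧ y = j
    · obtain ⟨hfx, hfy⟩ := hf
      subst hfx hfy
      rw [if_pos (by omega), if_neg (by omega), if_pos ⟨rfl, rfl⟩]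
      simp
    · rw [if_neg hf, add_zero]
      exact if_congr (by omega) rfl rfl
  have t3 : (if 0 < y ∧ (x < i ∨ (x = i ∧ y - 1 < j + 1)) then posInd m c x (y - 1) else 0)
      = (if 0 < y ∧ (x < i ∨ (x = i ∧ y - 1 < j)) then posInd m c x (y - 1) else 0)
      + (if x = i ∧ y = j + 1 then posInd m c i j else 0) := by
    by_cases hf : x = i ∧ y = j + 1
    · obtain ⟨hfx, hfy⟩ := hf
      subst hfx hfy
      rw [if_pos (by omega), if_neg (by omega), if_pos ⟨rfl, rfl⟩]
      simp
    · rw [if_neg hf, add_zero]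
      exact if_congr (by omega) rfl rfl
  have t4 : (if x < i ∨ (x = i ∧ y + 1 < j + 1) then posInd m c x (y + 1) else 0)
      = (if x < i ∨ (x = i ∧ y + 1 < j) then posInd m c x (y + 1) else 0)
      + (if x = i ∧ y + 1 = j then posInd m c i j else 0) := by
    by_cases hf : x = i ∧ y + 1 = j
    · obtain ⟨hfx, hfy⟩ := hf
      subst hfx
      rw [if_pos (by omega), if_neg (by omega), if_pos ⟨rfl, hfy⟩, hfy]
      simp
    · rw [if_neg hf, add_zero]
      exact if_congr (by omega) rfl rfl
  rw [t1, t2, t3, t4]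
  ring

theorem scnt_zero (m : List (List Int)) (c x y : Nat) : scnt m c 0 0 x y = 0 := by
  unfold scnt
  rw [if_neg (by omega), if_neg (by omega), if_neg (by omega), if_neg (by omega)]
  simp

theorem scnt_full (m : List (List Int)) (c x y : Nat) (hx : x < m.length) (hy : y < c) :
    scnt m c m.length 0 x y = nsum m c x y := by
  unfold scnt nsum
  have t1 : (if 0 < x ∧ (x - 1 < m.length ∨ (x - 1 = m.length ∧ y < 0)) then posInd m c (x - 1) y else 0)
      = (if 0 < x then posInd m c (x - 1) y else 0) :=
    if_congr (by omega) rfl rfl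
  have t2 : (if x + 1 < m.length ∨ (x + 1 = m.length ∧ y < 0) then posInd m c (x + 1) y else 0)
      = posInd m c (x + 1) y := by
    by_cases h1 : x + 1 < m.length
    · rw [if_pos (by omega)]
    · rw [if_neg (by omega)]
      unfold posInd
      rw [if_neg (by omega)]
  have t3 : (if 0 < y ∧ (x < m.length ∨ (x = m.length ∧ y - 1 < 0)) then posInd m c x (y - 1) else 0)
      = (if 0 < y then posInd m c x (y - 1) else 0) :=
    if_congr (by omega) rfl rfl
  have t4 : (if x < m.length ∨ (x = m.length ∧ y + 1 < 0) then posInd m c x (y + 1) else 0)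
      = posInd m c x (y + 1) := by
    rw [if_pos (by omega)]
  rw [t1, t2, t3, t4]

theorem scnt_row_end (m : List (List Int)) (c i x y : Nat) (hy : y < c) :
    scnt m c i c x y = scnt m c (i + 1) 0 x y := by
  unfold scnt
  have t1 : (if 0 < x ∧ (x - 1 < i ∨ (x - 1 = i ∧ y < c)) then posInd m c (x - 1) y else 0)
      = (if 0 < x ∧ (x - 1 < i + 1 ∨ (x - 1 = i + 1 ∧ y < 0)) then posInd m c (x - 1) y else 0) :=
    if_congr (by omega) rfl rfl
  have t2 : (if x + 1 < i ∨ (x + 1 = i ∧ y < c) then posInd m c (x + 1) y else 0)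
      = (if x + 1 < i + 1 ∨ (x + 1 = i + 1 ∧ y < 0) then posInd m c (x + 1) y else 0) :=
    if_congr (by omega) rfl rfl
  have t3 : (if 0 < y ∧ (x < i ∨ (x = i ∧ y - 1 < c)) then posInd m c x (y - 1) else 0)
      = (if 0 < y ∧ (x < i + 1 ∨ (x = i + 1 ∧ y - 1 < 0)) then posInd m c x (y - 1) else 0) :=
    if_congr (by omega) rfl rfl
  have t4 : (if x < i ∨ (x = i ∧ y + 1 < c) then posInd m c x (y + 1) else 0)
      = (if x < i + 1 ∨ (x = i + 1 ∧ y + 1 < 0) then posInd m c x (y + 1) else 0) := by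
    by_cases hyc : y + 1 < c
    · exact if_congr (by omega) rfl rfl
    · by_cases hxi : x = i
      · subst hxi
        rw [if_neg (by omega), if_pos (by omega)]
        unfold posInd
        rw [if_neg (by omega)]
      · exact if_congr (by omega) rfl rfl
  rw [t1, t2, t3, t4]

theorem cg_row_end (m : List (List Int)) (c i : Nat) : cg m c i c = cg m c (i + 1) 0 := by
  unfold cg
  apply List.map_congr_left
  intro x _
  apply List.map_congr_left
  intro y hy
  exact scnt_row_end m c i x y (List.mem_range.mp hy)

theorem cg_zero (m : List (List Int)) (c : Nat) :
    (PySem.List.pyRange 0 ((m.length : Nat) : Int) 1).map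
      (fun _ => List.replicate ((c : Nat) : Int).toNat 0) = cg m c 0 0 := by
  have h1 : ((c : Nat) : Int).toNat = c := by omega
  rw [h1, List.map_const', PySem.List.length_pyRange_one]
  have h2 : (((m.length : Nat) : Int) - 0).toNat = m.length := by omega
  rw [h2]
  symm
  unfold cg
  have h3 : ∀ x ∈ List.range m.length,
      (List.range c).map (fun y => scnt m c 0 0 x y) = List.replicate c 0 := by
    intro x _
    have h4 : ∀ y ∈ List.range c, scnt m c 0 0 x y = (0 : Int) :=
      fun y _ => scnt_zero m c x y
    rw [List.map_congr_left h4, List.map_const', List.length_range]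
  rw [List.map_congr_left h3, List.map_const', List.length_range]

-- the scatter body of B's middle loop, named for the proofs
def scatStep (matrix : List (List Int)) (rows cols : Int) (cnts : List (List Int)) (i j : Int) : List (List Int) :=
  if PySem.List.pyGetD (PySem.List.pyGetD matrix i []) j 0 > 0 then
    [((i - 1 : Int), (j : Int)), (i + 1, j), (i, j - 1), (i, j + 1)].foldl (bump rows cols) cnts
  else cnts

-- the body of B's second pass, named for the proofs
def stepC (counts m : List (List Int)) (i j : Int) : List (List Int) :=
  if PySem.List.pyGetD (PySem.List.pyGetD m i []) j 0 < 0 ∧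
     PySem.List.pyGetD (PySem.List.pyGetD counts i []) j 0 ≥ 2 then
    PySem.List.pySetD m i (PySem.List.pySetD (PySem.List.pyGetD m i []) j 0)
  else m

theorem portB_unfold (matrix : List (List Int)) :
    inbetweenSolution_alt matrix =
      (PySem.List.pyRange 0 (PySem.List.len matrix) 1).foldl (fun m i =>
        (PySem.List.pyRange 0 (PySem.List.len (PySem.List.pyGetD matrix 0 [])) 1).foldl
          (fun m j => stepC
            ((PySem.List.pyRange 0 (PySem.List.len matrix) 1).foldl (fun cnts i =>
              (PySem.List.pyRange 0 (PySem.List.len (PySem.List.pyGetD matrix 0 [])) 1).foldl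
                (fun cnts j => scatStep matrix (PySem.List.len matrix)
                  (PySem.List.len (PySem.List.pyGetD matrix 0 [])) cnts i j) cnts)
              ((PySem.List.pyRange 0 (PySem.List.len matrix) 1).map
                (fun _ => List.replicate (PySem.List.len (PySem.List.pyGetD matrix 0 [])).toNat 0)))
            m i j) m) matrix := rfl

theorem scatStep_cg (m : List (List Int)) (c i j : Nat) (hi : i < m.length) (hj : j < c) :
    scatStep m ((m.length : Nat) : Int) ((c : Nat) : Int) (cg m c i j) (↑i) (↑j) = cg m c i (j + 1) := by
  unfold scatStep
  rw [gA_getD]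
  have hR0 : ((m.length : Nat) : Int) = ((cg m c i j).length : Int) := by rw [length_cg]
  have hr0 : ∀ row ∈ cg m c i j, row.length = c := rows_cg m c i j
  have hR1 : ((m.length : Nat) : Int) =
      ((bump ((m.length : Nat) : Int) ((c : Nat) : Int) (cg m c i j) ((i : Int) - 1, (j : Int))).length : Int) := by
    rw [length_bump, length_cg]
  have hr1 := rows_bump ((m.length : Nat) : Int) ((c : Nat) : Int) (cg m c i j) c hR0 hr0 ((i : Int) - 1, (j : Int))
  have hR2 : ((m.length : Nat) : Int) =
      ((bump ((m.length : Nat) : Int) ((c : Nat) : Int)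
        (bump ((m.length : Nat) : Int) ((c : Nat) : Int) (cg m c i j) ((i : Int) - 1, (j : Int)))
        ((i : Int) + 1, (j : Int))).length : Int) := by
    rw [length_bump, length_bump, length_cg]
  have hr2 := rows_bump ((m.length : Nat) : Int) ((c : Nat) : Int) (bump ((m.length : Nat) : Int) ((c : Nat) : Int) (cg m c i j) ((i : Int) - 1, (j : Int))) c hR1 hr1 ((i : Int) + 1, (j : Int))
  have hR3 : ((m.length : Nat) : Int) =
      ((bump ((m.length : Nat) : Int) ((c : Nat) : Int)
        (bump ((m.length : Nat) : Int) ((c : Nat) : Int)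
          (bump ((m.length : Nat) : Int) ((c : Nat) : Int) (cg m c i j) ((i : Int) - 1, (j : Int)))
          ((i : Int) + 1, (j : Int))) ((i : Int), (j : Int) - 1)).length : Int) := by
    rw [length_bump, length_bump, length_bump, length_cg]
  have hr3 := rows_bump ((m.length : Nat) : Int) ((c : Nat) : Int) (bump ((m.length : Nat) : Int) ((c : Nat) : Int) (bump ((m.length : Nat) : Int) ((c : Nat) : Int) (cg m c i j) ((i : Int) - 1, (j : Int))) ((i : Int) + 1, (j : Int))) c hR2 hr2 ((i : Int), (j : Int) - 1)
  by_cases hpos : 0 < gA m i j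
  · rw [if_pos hpos]
    simp only [List.foldl_cons, List.foldl_nil]
    apply grid_ext _ _ c
    · rw [length_bump, length_bump, length_bump, length_bump, length_cg, length_cg]
    · exact rows_bump ((m.length : Nat) : Int) ((c : Nat) : Int) (bump ((m.length : Nat) : Int) ((c : Nat) : Int) (bump ((m.length : Nat) : Int) ((c : Nat) : Int) (bump ((m.length : Nat) : Int) ((c : Nat) : Int) (cg m c i j) ((i : Int) - 1, (j : Int))) ((i : Int) + 1, (j : Int))) ((i : Int), (j : Int) - 1)) c hR3 hr3 ((i : Int), (j : Int) + 1)
    · exact rows_cg m c i (j + 1)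
    · intro x y hx hy
      rw [length_bump, length_bump, length_bump, length_bump, length_cg] at hx
      rw [gA_bump ((m.length : Nat) : Int) ((c : Nat) : Int) (bump ((m.length : Nat) : Int) ((c : Nat) : Int) (bump ((m.length : Nat) : Int) ((c : Nat) : Int) (bump ((m.length : Nat) : Int) ((c : Nat) : Int) (cg m c i j) ((i : Int) - 1, (j : Int))) ((i : Int) + 1, (j : Int))) ((i : Int), (j : Int) - 1)) c hR3 rfl hr3 ((i : Int), (j : Int) + 1) x y,
        gA_bump ((m.length : Nat) : Int) ((c : Nat) : Int) (bump ((m.length : Nat) : Int) ((c : Nat) : Int) (bump ((m.length : Nat) : Int) ((c : Nat) : Int) (cg m c i j) ((i : Int) - 1, (j : Int))) ((i : Int) + 1, (j : Int))) c hR2 rfl hr2 ((i : Int), (j : Int) - 1) x y,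
        gA_bump ((m.length : Nat) : Int) ((c : Nat) : Int) (bump ((m.length : Nat) : Int) ((c : Nat) : Int) (cg m c i j) ((i : Int) - 1, (j : Int))) c hR1 rfl hr1 ((i : Int) + 1, (j : Int)) x y,
        gA_bump ((m.length : Nat) : Int) ((c : Nat) : Int) (cg m c i j) c hR0 rfl hr0 ((i : Int) - 1, (j : Int)) x y]
      simp only [length_bump, length_cg]
      rw [gA_cg m c i j x y hx hy, gA_cg m c i (j + 1) x y hx hy]
      rw [scnt_succ]
      have hp : posInd m c i j = 1 := by
        unfold posInd; rw [if_pos ⟨hi, hj, hpos⟩]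
      rw [hp]
      rw [show (if ((i : Int) - 1, (j : Int)).1 = (x : Int) ∧ ((i : Int) - 1, (j : Int)).2 = (y : Int) ∧ x < m.length ∧ y < c then (1 : Int) else 0)
            = (if x + 1 = i ∧ y = j then (1 : Int) else 0) from if_congr (by simp <;> omega) rfl rfl]
      rw [show (if ((i : Int) + 1, (j : Int)).1 = (x : Int) ∧ ((i : Int) + 1, (j : Int)).2 = (y : Int) ∧ x < m.length ∧ y < c then (1 : Int) else 0)
            = (if x = i + 1 ∧ y = j then (1 : Int) else 0) from if_congr (by simp <;> omega) rfl rfl]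
      rw [show (if ((i : Int), (j : Int) - 1).1 = (x : Int) ∧ ((i : Int), (j : Int) - 1).2 = (y : Int) ∧ x < m.length ∧ y < c then (1 : Int) else 0)
            = (if x = i ∧ y + 1 = j then (1 : Int) else 0) from if_congr (by simp <;> omega) rfl rfl]
      rw [show (if ((i : Int), (j : Int) + 1).1 = (x : Int) ∧ ((i : Int), (j : Int) + 1).2 = (y : Int) ∧ x < m.length ∧ y < c then (1 : Int) else 0)
            = (if x = i ∧ y = j + 1 then (1 : Int) else 0) from if_congr (by simp <;> omega) rfl rfl]
  · rw [if_neg hpos]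
    apply grid_ext _ _ c
    · rw [length_cg, length_cg]
    · exact rows_cg m c i j
    · exact rows_cg m c i (j + 1)
    · intro x y hx hy
      rw [length_cg] at hx
      rw [gA_cg m c i j x y hx hy, gA_cg m c i (j + 1) x y hx hy, scnt_succ]
      have hp0 : posInd m c i j = 0 := by
        unfold posInd
        rw [if_neg (by rintro ⟨_, _, h⟩; exact hpos h)]
      rw [hp0]
      simp

theorem scatter_inner (m : List (List Int)) (c i : Nat) (hi : i < m.length) :
    ∀ (k j : Nat), j + k = c →
      (PySem.List.pyRange (↑j) (↑c) 1).foldl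
        (fun cnts jj => scatStep m ((m.length : Nat) : Int) ((c : Nat) : Int) cnts (↑i) jj)
        (cg m c i j) = cg m c i c := by
  intro k
  induction k with
  | zero =>
    intro j hj
    have hjc : j = c := by omega
    subst hjc
    rw [PySem.List.pyRange_one_eq_nil (by omega)]
    rfl
  | succ k ih =>
    intro j hj
    rw [PySem.List.pyRange_one_cons (by exact_mod_cast (by omega : j < c))]
    simp only [List.foldl_cons]
    rw [scatStep_cg m c i j hi (by omega)]
    have hcast : ((j : Int) + 1) = ((j + 1 : Nat) : Int) := by push_cast; ring
    rw [hcast]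
    exact ih (j + 1) (by omega)

theorem scatter_outer (m : List (List Int)) (c : Nat) :
    ∀ (k i : Nat), i + k = m.length →
      (PySem.List.pyRange (↑i) (↑m.length) 1).foldl (fun cnts ii =>
        (PySem.List.pyRange 0 (↑c) 1).foldl
          (fun cnts2 jj => scatStep m ((m.length : Nat) : Int) ((c : Nat) : Int) cnts2 ii jj) cnts)
        (cg m c i 0) = cg m c m.length 0 := by
  intro k
  induction k with
  | zero =>
    intro i hi
    have hieq : i = m.length := by omega
    subst hieq
    rw [show PySem.List.pyRange (↑m.length) (↑m.length) 1 = [] from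
      PySem.List.pyRange_one_eq_nil (by omega)]
    rfl
  | succ k ih =>
    intro i hi
    rw [show PySem.List.pyRange (↑i) (↑m.length) 1 = (↑i : Int) :: PySem.List.pyRange ((↑i : Int) + 1) (↑m.length) 1 from
      PySem.List.pyRange_one_cons (by exact_mod_cast (by omega : i < m.length))]
    simp only [List.foldl_cons]
    have h0 : (PySem.List.pyRange 0 (↑c) 1).foldl
        (fun cnts2 jj => scatStep m ((m.length : Nat) : Int) ((c : Nat) : Int) cnts2 (↑i) jj)
        (cg m c i 0) = cg m c i c := by
      have := scatter_inner m c i (by omega) c 0 (by omega)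
      simpa using this
    rw [h0, cg_row_end]
    have hcast : ((i : Int) + 1) = ((i + 1 : Nat) : Int) := by push_cast; ring
    rw [hcast]
    exact ih (i + 1) (by omega)

theorem stepC_pt (m : List (List Int)) (c i j : Nat) (hi : i < m.length) (hj : j < c) :
    stepC (cg m c m.length 0) (pt m c i j) (↑i) (↑j) = pt m c i (j + 1) := by
  unfold stepC
  have hself : PySem.List.pyGetD (PySem.List.pyGetD (pt m c i j) (↑i : Int) []) (↑j : Int) 0 = gA m i j := by
    rw [gA_getD]; exact gA_pt_self m c i j
  have hcnt : PySem.List.pyGetD (PySem.List.pyGetD (cg m c m.length 0) (↑i : Int) []) (↑j : Int) 0 = nsum m c i j := by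
    rw [gA_getD, gA_cg m c m.length 0 i j hi hj]
    exact scnt_full m c i j hi hj
  by_cases hcond : gA m i j < 0 ∧ 2 ≤ nsum m c i j
  · rw [if_pos (by rw [hself, hcnt]; exact ⟨hcond.1, hcond.2⟩)]
    have h1 : PySem.List.pyGetD (pt m c i j) (↑i : Int) [] = (pt m c i j).getD i [] := by
      simp [PySem.List.pyGetD_natCast]
    rw [h1, PySem.List.pySetD_natCast, PySem.List.pySetD_natCast]
    exact pt_set m c i j hi hj hcond
  · rw [if_neg (by rw [hself, hcnt]; exact fun hh => hcond ⟨hh.1, hh.2⟩)]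
    exact pt_noset m c i j hcond

theorem loopC_inner (m : List (List Int)) (c i : Nat) (hcc : (m.getD 0 []).length = c)
    (hi : i < m.length) :
    ∀ (k j : Nat), j + k = c →
      (PySem.List.pyRange (↑j) (↑c) 1).foldl
        (fun mm l => stepC (cg m c m.length 0) mm (↑i) l) (pt m c i j) = pt m c i c := by
  intro k
  induction k with
  | zero =>
    intro j hj
    have hjc : j = c := by omega
    subst hjc
    rw [PySem.List.pyRange_one_eq_nil (by omega)]
    rfl
  | succ k ih =>
    intro j hj
    rw [PySem.List.pyRange_one_cons (by exact_mod_cast (by omega : j < c))]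
    simp only [List.foldl_cons]
    rw [stepC_pt m c i j hi (by omega)]
    have hcast : ((j : Int) + 1) = ((j + 1 : Nat) : Int) := by push_cast; ring
    rw [hcast]
    exact ih (j + 1) (by omega)

theorem loopC_outer (m : List (List Int)) (c : Nat) (hcc : (m.getD 0 []).length = c) :
    ∀ (k i : Nat), i + k = m.length →
      (PySem.List.pyRange (↑i) (↑m.length) 1).foldl (fun mm ii =>
        (PySem.List.pyRange 0 (↑c) 1).foldl
          (fun mm2 l => stepC (cg m c m.length 0) mm2 ii l) mm)
        (pt m c i 0) = pt m c m.length 0 := by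
  intro k
  induction k with
  | zero =>
    intro i hi
    have hieq : i = m.length := by omega
    subst hieq
    rw [show PySem.List.pyRange (↑m.length) (↑m.length) 1 = [] from
      PySem.List.pyRange_one_eq_nil (by omega)]
    rfl
  | succ k ih =>
    intro i hi
    rw [show PySem.List.pyRange (↑i) (↑m.length) 1 = (↑i : Int) :: PySem.List.pyRange ((↑i : Int) + 1) (↑m.length) 1 from
      PySem.List.pyRange_one_cons (by exact_mod_cast (by omega : i < m.length))]
    simp only [List.foldl_cons]
    have h0 : (PySem.List.pyRange 0 (↑c) 1).foldl
        (fun mm2 l => stepC (cg m c m.length 0) mm2 (↑i) l) (pt m c i 0) = pt m c i c := by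
      have := loopC_inner m c i hcc (by omega) c 0 (by omega)
      simpa using this
    rw [h0, pt_row_end]
    have hcast : ((i : Int) + 1) = ((i + 1 : Nat) : Int) := by push_cast; ring
    rw [hcast]
    exact ih (i + 1) (by omega)

theorem portB_eq (matrix : List (List Int)) :
    inbetweenSolution_alt matrix = pt matrix ((matrix.getD 0 []).length) matrix.length 0 := by
  rw [portB_unfold]
  have h1 : PySem.List.len (PySem.List.pyGetD matrix 0 []) = (((matrix.getD 0 []).length : Nat) : Int) := by
    simp [PySem.List.len_eq, PySem.List.pyGetD_zero]
  rw [h1, PySem.List.len_eq]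
  rw [cg_zero matrix ((matrix.getD 0 []).length)]
  have hsc := scatter_outer matrix ((matrix.getD 0 []).length) matrix.length 0 (by omega)
  rw [show ((0 : Nat) : Int) = (0 : Int) from rfl] at hsc
  rw [hsc]
  have := loopC_outer matrix ((matrix.getD 0 []).length) rfl matrix.length 0 (by omega)
  rw [pt_zero] at this
  simpa using this

-- ===== VERDICT (by name: the statement is the Claim_ definition above) =====
theorem inbetweenSolution_spec : Claim_equal_inbetweenSolution := by
  intro matrix _ _
  unfold Spec_inbetweenSolution
  rw [portA_eq, portB_eq]
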